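-- pv_equiv track=rewrite | github.com/dmerz75/myconfigs | contacts/deprecated/Segment.py | between_2_segments
-- ===== SOURCE A (Python) =====
-- def between_2_segments(dct,series1,series2):
--     ''' Called as tuple.
--     between_2_segments(dct,(40,115),(1,39))
--     between_2_segments(dct,[(4,11),(139,169)],domainIA)
--     series: lst of tuples(first,last resid)
--     series1: on this segment
--     series2: in contact with this segment
--     '''
--     dct_inter_contacts = {}
--     for tup1 in series1:
--         # print 'tup1:',tup1
--         for tup2 in series2:
--             # print 'tup2:',tup2
--             dct_slice = {key: value for key,value in dct.items() if \
--                          key[0] >= tup1[0] and key[0] <= tup1[1] and \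
--                          key[1] >= tup2[0] and key[1] <= tup2[1]}
--             dct_inter_contacts.update(dct_slice)
--     return dct_inter_contacts
-- ===== SOURCE B (Python) =====
-- def between_2_segments(dct, series1, series2):
--     def _first_idx(series, x):
--         for i, (lo, hi) in enumerate(series):
--             if lo <= x <= hi:
--                 return i
--         return None
--
--     buckets = {}
--     for key, value in dct.items():
--         i = _first_idx(series1, key[0])
--         j = _first_idx(series2, key[1])
--         if i is not None and j is not None:
--             buckets.setdefault((i, j), []).append((key, value))
--
--     out = {}
--     for i in range(len(series1)):
--         for j in range(len(series2)):
--             for key, value in buckets.get((i, j), []):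
--                 out[key] = value
--     return out
-- ===== Notes on version B (the rewrite author's own statement) =====
-- stated objective: faster
-- what changed: Replaces the triple nested loop (each (seg1,seg2) pair re-scanning and re-filtering the whole dict) by a single pass over the dict that assigns each entry its first matching interval pair, buckets entries by that pair, then emits the buckets in lexicographic pair order.
import Mathlib
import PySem

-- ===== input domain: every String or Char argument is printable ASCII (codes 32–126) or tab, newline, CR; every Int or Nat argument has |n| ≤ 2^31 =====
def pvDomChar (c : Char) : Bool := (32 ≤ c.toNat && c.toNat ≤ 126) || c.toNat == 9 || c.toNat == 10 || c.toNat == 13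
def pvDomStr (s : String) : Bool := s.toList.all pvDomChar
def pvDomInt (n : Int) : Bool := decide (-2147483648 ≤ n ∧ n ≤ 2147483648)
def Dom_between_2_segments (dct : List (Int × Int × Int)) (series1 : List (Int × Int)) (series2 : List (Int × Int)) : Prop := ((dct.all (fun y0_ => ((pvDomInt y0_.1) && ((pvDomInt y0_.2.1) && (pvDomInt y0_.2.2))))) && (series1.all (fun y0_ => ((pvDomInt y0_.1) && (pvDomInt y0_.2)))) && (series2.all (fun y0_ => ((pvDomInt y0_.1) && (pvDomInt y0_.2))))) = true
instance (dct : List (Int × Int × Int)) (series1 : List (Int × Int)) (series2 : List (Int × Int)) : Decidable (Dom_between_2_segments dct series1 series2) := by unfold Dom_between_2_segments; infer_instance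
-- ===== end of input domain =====

-- B replaces A's triple loop (each (seg1,seg2) pair re-scanning the whole dict) by one pass over the
-- dict that buckets each entry under its first matching interval pair, then emits buckets in pair order.

-- ===== PORT A =====
-- the dict argument (keys (k1,k2), values v, flattened as (k1,k2,v)) is read with Python dict
-- semantics via PySem.Dict.ofList; the returned dict is flattened back the same way.
def between_2_segments (dct : List (Int × Int × Int)) (series1 : List (Int × Int)) (series2 : List (Int × Int)) : List (Int × Int × Int) :=
  let d : PySem.Dict (Int × Int) Int := PySem.Dict.ofList (dct.map (fun p => ((p.1, p.2.1), p.2.2)))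
  let r : PySem.Dict (Int × Int) Int :=
    series1.foldl (fun r tup1 =>
      series2.foldl (fun r tup2 =>
        r.update (d.items.filter (fun kv =>
          decide (kv.1.1 ≥ tup1.1) && decide (kv.1.1 ≤ tup1.2) &&
          decide (kv.1.2 ≥ tup2.1) && decide (kv.1.2 ≤ tup2.2)))) r) PySem.Dict.empty
  r.items.map (fun kv => (kv.1.1, kv.1.2, kv.2))

-- ===== PORT B =====
-- helper _first_idx of Source B: first index of an interval containing x (None if there is none)
def pvFirstIdx : List (Int × Int) → Int → Option Nat
  | [], _ => none
  | t :: rest, x => if t.1 ≤ x ∧ x ≤ t.2 then some 0 else (pvFirstIdx rest x).map (· + 1)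

def between_2_segments_alt (dct : List (Int × Int × Int)) (series1 : List (Int × Int)) (series2 : List (Int × Int)) : List (Int × Int × Int) :=
  let d : PySem.Dict (Int × Int) Int := PySem.Dict.ofList (dct.map (fun p => ((p.1, p.2.1), p.2.2)))
  let buckets : PySem.Dict (Nat × Nat) (List ((Int × Int) × Int)) :=
    d.items.foldl (fun b kv =>
      match pvFirstIdx series1 kv.1.1, pvFirstIdx series2 kv.1.2 with
      | some i, some j => b.modify (i, j) [] (· ++ [kv])
      | _, _ => b) PySem.Dict.empty
  let out : PySem.Dict (Int × Int) Int :=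
    (List.range series1.length).foldl (fun o i =>
      (List.range series2.length).foldl (fun o j =>
        (buckets.getD (i, j) []).foldl (fun o kv => o.insert kv.1 kv.2) o) o) PySem.Dict.empty
  out.items.map (fun kv => (kv.1.1, kv.1.2, kv.2))

-- ===== PRECONDITION & SPEC =====
def Spec_between_2_segments (dct : List (Int × Int × Int)) (series1 : List (Int × Int)) (series2 : List (Int × Int)) (out : List (Int × Int × Int)) : Prop := out = between_2_segments_alt dct series1 series2
instance (dct : List (Int × Int × Int)) (series1 : List (Int × Int)) (series2 : List (Int × Int)) (out : List (Int × Int × Int)) : Decidable (Spec_between_2_segments dct series1 series2 out) := by unfold Spec_between_2_segments; infer_instance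

-- ===== CLAIM (what is proved, stated in full; the proofs are below) =====
def Claim_equal_between_2_segments : Prop := ∀ (dct : List (Int × Int × Int)) (series1 : List (Int × Int)) (series2 : List (Int × Int)), Dom_between_2_segments dct series1 series2 → Spec_between_2_segments dct series1 series2 (between_2_segments dct series1 series2)

-- ===== LEMMAS AND PROOFS =====

-- interval-membership test shared by the rewriting below
def pvM (t : Int × Int) (k : Int) : Bool := decide (t.1 ≤ k) && decide (k ≤ t.2)

theorem pvFirstIdx_eq_findIdx (s : List (Int × Int)) (x : Int) :
    pvFirstIdx s x = List.findIdx? (fun t => pvM t x) s := by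
  induction s with
  | nil => rfl
  | cons t rest ih =>
      rw [pvFirstIdx, List.findIdx?_cons, ih]
      by_cases h : t.1 ≤ x ∧ x ≤ t.2 <;> simp [pvM, h]

-- dedup of a cons
theorem pv_dedup_cons {α : Type} [BEq α] [LawfulBEq α] (a : α) (l : List α) :
    PySem.List.dedup (a :: l) = a :: (PySem.List.dedup l).filter (fun y => !(y == a)) := by
  have h1 : (a :: l) = [a] ++ l := rfl
  rw [PySem.List.dedup_eq_ofList, h1, PySem.Set.ofList_append, PySem.Set.update_eq_append_filter]
  have h2 : PySem.Set.ofList [a] = [a] := by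
    simp [PySem.Set.ofList, PySem.Set.add, PySem.Set.empty]
  rw [h2, PySem.List.dedup_eq_ofList, List.singleton_append]
  congr 1
  apply List.filter_congr
  intro y _
  by_cases hy : y = a <;> simp [hy]

-- dedup of an append
theorem pv_dedup_append {α : Type} [BEq α] [LawfulBEq α] (l1 l2 : List α) :
    PySem.List.dedup (l1 ++ l2)
      = PySem.List.dedup l1 ++ (PySem.List.dedup l2).filter (fun y => !(decide (y ∈ l1))) := by
  rw [PySem.List.dedup_eq_ofList, PySem.Set.ofList_append, PySem.Set.update_eq_append_filter,
    PySem.List.dedup_eq_ofList, PySem.List.dedup_eq_ofList]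
  congr 1
  apply List.filter_congr
  intro y _
  by_cases hy : y ∈ l1
  · simp [hy]
  · simp [hy]

theorem pv_dedup_of_nodup {α : Type} [BEq α] [LawfulBEq α] (l : List α) (h : l.Nodup) :
    PySem.List.dedup l = l := by
  induction l with
  | nil => rfl
  | cons a l ih =>
      rw [pv_dedup_cons, ih h.of_cons]
      congr 1
      apply List.filter_eq_self.mpr
      intro y hy
      have : y ≠ a := by rintro rfl; exact (List.nodup_cons.mp h).1 hy
      simp [this]

theorem pv_mem_dedup {α : Type} [BEq α] [LawfulBEq α] (l : List α) (y : α) :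
    y ∈ PySem.List.dedup l ↔ y ∈ l := by
  simp [PySem.List.dedup_eq_ofList, PySem.Set.mem_ofList]

-- G: a dict update with pairs on which the key determines the value appends the fresh deduped pairs
theorem pv_update_items {κ ν : Type} [BEq κ] [LawfulBEq κ] [BEq ν] [LawfulBEq ν] :
    ∀ (L : List (κ × ν)) (d : PySem.Dict κ ν), d.keys.Nodup →
    (∀ p ∈ L, ∀ q ∈ d.items, p.1 = q.1 → p = q) →
    (∀ p ∈ L, ∀ q ∈ L, p.1 = q.1 → p = q) →
    (d.update L).items = d.items ++ (PySem.List.dedup L).filter (fun p => !(d.contains p.1)) := by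
  intro L
  induction L with
  | nil => intro d _ _ _; simp [PySem.Dict.update, PySem.List.dedup, PySem.Set.ofList, PySem.Set.empty]
  | cons p L ih =>
      intro d hnd h1 h2
      have hstep : d.update (p :: L) = (d.insert p.1 p.2).update L := rfl
      have h2t : ∀ a ∈ L, ∀ b ∈ L, a.1 = b.1 → a = b := by
        intro a ha b hb
        exact h2 a (List.mem_cons_of_mem _ ha) b (List.mem_cons_of_mem _ hb)
      by_cases hc : d.contains p.1 = true
      · have hins : d.insert p.1 p.2 = d := by
          apply PySem.Dict.ext
          rw [PySem.Dict.items_insert_of_contains d p.2 hc]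
          have hmapid : ∀ q ∈ d.items, (fun q => if (q.1 == p.1) = true then (p.1, p.2) else q) q = q := by
            intro q hq
            by_cases he : q.1 = p.1
            · have hpq : p = q := h1 p (List.mem_cons_self) q hq he.symm
              simp [← hpq]
            · simp [he]
          rw [List.map_congr_left hmapid]
          simp
        rw [hstep, hins, ih d hnd (fun a ha => h1 a (List.mem_cons_of_mem _ ha)) h2t]
        congr 1
        rw [pv_dedup_cons, List.filter_cons]
        simp only [hc, Bool.not_true, Bool.false_eq_true, if_false, List.filter_filter]
        apply List.filter_congr
        intro y hy
        by_cases hcy : d.contains y.1 = true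
        · simp [hcy]
        · have hyp : y ≠ p := by
            intro he
            rw [he] at hcy
            exact hcy hc
          simp [hcy, hyp]
      · have hcf : d.contains p.1 = false := Bool.eq_false_iff.mpr hc
        have hitems : (d.insert p.1 p.2).items = d.items ++ [p] := by
          rw [PySem.Dict.items_insert_of_not_contains d p.2 hcf]
        have hnd' : (d.insert p.1 p.2).keys.Nodup := PySem.Dict.nodup_keys_insert d p.1 p.2 hnd
        have h1' : ∀ a ∈ L, ∀ q ∈ (d.insert p.1 p.2).items, a.1 = q.1 → a = q := by
          intro a ha q hq he
          rw [hitems] at hq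
          rcases List.mem_append.mp hq with hq | hq
          · exact h1 a (List.mem_cons_of_mem _ ha) q hq he
          · have : q = p := by simpa using hq
            subst this
            exact h2 a (List.mem_cons_of_mem _ ha) q (List.mem_cons_self) he
        rw [hstep, ih (d.insert p.1 p.2) hnd' h1' h2t, hitems]
        rw [pv_dedup_cons, List.filter_cons]
        simp only [hcf, Bool.not_false, if_pos, List.filter_filter, List.append_assoc,
          List.singleton_append]
        congr 2
        apply List.filter_congr
        intro y hy
        rw [PySem.Dict.contains_insert]
        by_cases hyp : y = p
        · subst hyp; simp
        · have hy1 : ¬ (y.1 == p.1) = true := by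
            intro he
            exact hyp (h2 y (List.mem_cons_of_mem _ ((pv_mem_dedup L y).mp hy)) p
              (List.mem_cons_self) (by simpa using he))
          simp [Bool.eq_false_iff.mpr hy1, hyp]

-- H: dedup of a concatenation of filter-blocks regroups by first matching block index
theorem pv_dedup_flat {α T : Type} [BEq α] [LawfulBEq α] [DecidableEq α] (base : List α) (hb : base.Nodup)
    (q : T → α → Bool) :
    ∀ ts : List T,
      PySem.List.dedup (ts.flatMap (fun t => base.filter (q t)))
        = (List.range ts.length).flatMap (fun j =>
            base.filter (fun x => List.findIdx? (fun t => q t x) ts == some j)) := by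
  intro ts
  induction ts with
  | nil => simp [PySem.List.dedup, PySem.Set.ofList, PySem.Set.empty]
  | cons t ts ih =>
      rw [List.flatMap_cons, pv_dedup_append, pv_dedup_of_nodup _ (hb.filter _), ih]
      rw [List.length_cons, List.range_succ_eq_map, List.flatMap_cons]
      congr 1
      · apply List.filter_congr
        intro x _
        rw [List.findIdx?_cons]
        by_cases h : q t x = true
        · simp [h]
        · simp only [h]
          cases hr : List.findIdx? (fun t => q t x) ts <;> simp
      · rw [List.filter_flatMap, List.flatMap_map]
        apply List.flatMap_congr
        intro j _
        rw [List.filter_filter]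
        apply List.filter_congr
        intro x hx
        rw [List.findIdx?_cons]
        by_cases h : q t x = true
        · have hmem : x ∈ base.filter (q t) := List.mem_filter.mpr ⟨hx, h⟩
          simp [h, hmem]
        · have hmem : x ∉ base.filter (q t) := by
            intro hm
            exact absurd (List.mem_filter.mp hm).2 h
          cases hr : List.findIdx? (fun t => q t x) ts <;> simp [hmem, h]

-- H2: same for the nested double loop of A
theorem pv_dedup_flat2 {α : Type} [BEq α] [LawfulBEq α] [DecidableEq α] (base : List α) (hb : base.Nodup)
    (q1 q2 : (Int × Int) → α → Bool) (s2 : List (Int × Int)) :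
    ∀ ts1 : List (Int × Int),
      PySem.List.dedup (ts1.flatMap (fun t1 => s2.flatMap (fun t2 =>
          base.filter (fun x => q1 t1 x && q2 t2 x))))
        = (List.range ts1.length).flatMap (fun i => (List.range s2.length).flatMap (fun j =>
            base.filter (fun x =>
              (List.findIdx? (fun t => q1 t x) ts1 == some i) &&
              (List.findIdx? (fun t => q2 t x) s2 == some j)))) := by
  intro ts1
  induction ts1 with
  | nil => simp [PySem.List.dedup, PySem.Set.ofList, PySem.Set.empty]
  | cons t ts ih =>
      rw [List.flatMap_cons, pv_dedup_append, ih,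
        pv_dedup_flat base hb (fun t2 x => q1 t x && q2 t2 x) s2]
      rw [List.length_cons, List.range_succ_eq_map, List.flatMap_cons]
      congr 1
      · apply List.flatMap_congr
        intro j _
        apply List.filter_congr
        intro x _
        by_cases hq : q1 t x = true
        · have hfun : (fun t2 => q1 t x && q2 t2 x) = (fun t2 => q2 t2 x) := by
            funext t2; rw [hq, Bool.true_and]
          rw [hfun, List.findIdx?_cons]
          simp [hq]
        · have hnone : List.findIdx? (fun t2 => q1 t x && q2 t2 x) s2 = none := by
            apply List.findIdx?_eq_none_iff.mpr
            intro t2 _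
            simp [Bool.eq_false_iff.mpr hq]
          rw [hnone, List.findIdx?_cons]
          cases hr : List.findIdx? (fun t' => q1 t' x) ts <;> simp [hq]
      · rw [List.filter_flatMap, List.flatMap_map]
        apply List.flatMap_congr
        intro i _
        rw [List.filter_flatMap]
        apply List.flatMap_congr
        intro j _
        rw [List.filter_filter]
        apply List.filter_congr
        intro x hx
        rw [List.findIdx?_cons]
        by_cases hq : q1 t x = true
        · by_cases hj : List.findIdx? (fun t2 => q2 t2 x) s2 = some j
          · have hex : ∃ t2 ∈ s2, q2 t2 x = true := by
              by_contra hno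
              push Not at hno
              have hn : List.findIdx? (fun t2 => q2 t2 x) s2 = none :=
                List.findIdx?_eq_none_iff.mpr (fun t2 ht2 => Bool.eq_false_iff.mpr (hno t2 ht2))
              rw [hn] at hj
              simp at hj
            obtain ⟨t2, ht2, hq2⟩ := hex
            have hxBt : x ∈ s2.flatMap (fun t2 => base.filter (fun x => q1 t x && q2 t2 x)) :=
              List.mem_flatMap.mpr ⟨t2, ht2, List.mem_filter.mpr ⟨hx, by simp [hq, hq2]⟩⟩
            simp [hq, hxBt, hj]
          · simp [hq, hj]
        · have hxBt : x ∉ s2.flatMap (fun t2 => base.filter (fun x => q1 t x && q2 t2 x)) := by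
            intro hm
            obtain ⟨t2, _, hmf⟩ := List.mem_flatMap.mp hm
            have h2 := (List.mem_filter.mp hmf).2
            simp [hq] at h2
          cases hr : List.findIdx? (fun t' => q1 t' x) ts <;> simp [hq, hxBt]

-- folding dict updates over a list is one update with the concatenation
theorem pv_foldl_update {κ ν T : Type} [BEq κ] (g : T → List (κ × ν)) :
    ∀ (ts : List T) (d : PySem.Dict κ ν),
      ts.foldl (fun d t => d.update (g t)) d = d.update (ts.flatMap g) := by
  intro ts
  induction ts with
  | nil => intro d; rfl
  | cons t ts ih =>
      intro d
      simp only [List.foldl_cons, List.flatMap_cons, ih]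
      show _ = List.foldl _ _ (g t ++ ts.flatMap g)
      rw [List.foldl_append]
      rfl

-- folding a fold over blocks is one fold over the concatenation
theorem pv_foldl_flatMap {β T σ : Type} (g : T → List β) (step : σ → β → σ) :
    ∀ (ts : List T) (s : σ),
      ts.foldl (fun s t => (g t).foldl step s) s = (ts.flatMap g).foldl step s := by
  intro ts
  induction ts with
  | nil => intro s; rfl
  | cons t ts ih =>
      intro s
      simp only [List.foldl_cons, List.flatMap_cons, ih, List.foldl_append]

-- the bucket dict of B: each bucket is the corresponding filter of the scanned list
theorem pv_buckets_getD (s1 s2 : List (Int × Int)) (i j : Nat) :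
    ∀ (l : List ((Int × Int) × Int)) (b : PySem.Dict (Nat × Nat) (List ((Int × Int) × Int))),
      (l.foldl (fun b kv =>
        match pvFirstIdx s1 kv.1.1, pvFirstIdx s2 kv.1.2 with
        | some i, some j => b.modify (i, j) [] (· ++ [kv])
        | _, _ => b) b).getD (i, j) []
      = b.getD (i, j) [] ++ l.filter (fun kv =>
          (pvFirstIdx s1 kv.1.1 == some i) && (pvFirstIdx s2 kv.1.2 == some j)) := by
  intro l
  induction l with
  | nil => intro b; simp
  | cons kv l ih =>
      intro b
      rw [List.foldl_cons, List.filter_cons]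
      cases h1 : pvFirstIdx s1 kv.1.1 with
      | none =>
          rw [ih b]
          simp
      | some i' =>
          cases h2 : pvFirstIdx s2 kv.1.2 with
          | none =>
              rw [ih b]
              simp
          | some j' =>
              simp only [ih]
              rw [PySem.Dict.getD_modify]
              by_cases hij : (i, j) = (i', j')
              · obtain ⟨rfl, rfl⟩ : i = i' ∧ j = j' := by
                  exact ⟨congrArg Prod.fst hij, congrArg Prod.snd hij⟩
                simp [List.append_assoc]
              · rw [if_neg hij]
                have : ¬ ((some i' == some i) && (some j' == some j)) = true := by
                  intro hb
                  apply hij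
                  have h := Bool.and_eq_true_iff.mp hb
                  have hi : i' = i := by simpa using h.1
                  have hj : j' = j := by simpa using h.2
                  rw [hi, hj]
                rw [if_neg this]

-- keys of the regrouped concatenation are distinct
theorem pv_nodup_flatten {α ι K : Type} [BEq ι] [LawfulBEq ι] (base : List α) (f : α → K)
    (hk : (base.map f).Nodup) (h : α → ι) :
    ∀ (ids : List ι), ids.Nodup →
      (((ids.flatMap (fun i => base.filter (fun x => h x == i))).map f)).Nodup := by
  intro ids
  induction ids with
  | nil => intro _; simp
  | cons i ids ih =>
      intro hnd
      rw [List.flatMap_cons, List.map_append]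
      refine List.nodup_append.mpr ⟨?_, ih (List.nodup_cons.mp hnd).2, ?_⟩
      · exact (List.filter_sublist.map f).nodup hk
      · intro a ha b hb
        obtain ⟨x1, hx1, rfl⟩ := List.mem_map.mp ha
        obtain ⟨x2', hx2'mem, rfl⟩ := List.mem_map.mp hb
        intro heq
        obtain ⟨i', hi', hx2f⟩ := List.mem_flatMap.mp hx2'mem
        have hb1 : x1 ∈ base := (List.mem_filter.mp hx1).1
        have hb2 : x2' ∈ base := (List.mem_filter.mp hx2f).1
        have hx12 : x1 = x2' := List.inj_on_of_nodup_map hk hb1 hb2 heq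
        have h1 : h x1 = i := by
          have := (List.mem_filter.mp hx1).2
          simpa using this
        have h2 : h x2' = i' := by
          have := (List.mem_filter.mp hx2f).2
          simpa using this
        rw [hx12, h2] at h1
        exact (List.nodup_cons.mp hnd).1 (h1 ▸ hi')

-- A's nested update loop regroups the dict entries by first matching interval pair
theorem pv_A_items (dct : List (Int × Int × Int)) (series1 series2 : List (Int × Int)) :
    (series1.foldl (fun r tup1 =>
      series2.foldl (fun r tup2 =>
        r.update ((PySem.Dict.ofList (dct.map (fun p => ((p.1, p.2.1), p.2.2)))).items.filter (fun kv =>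
          decide (kv.1.1 ≥ tup1.1) && decide (kv.1.1 ≤ tup1.2) &&
          decide (kv.1.2 ≥ tup2.1) && decide (kv.1.2 ≤ tup2.2)))) r) PySem.Dict.empty).items
    = (List.range series1.length).flatMap (fun i => (List.range series2.length).flatMap (fun j =>
        (PySem.Dict.ofList (dct.map (fun p => ((p.1, p.2.1), p.2.2)))).items.filter (fun kv =>
          (pvFirstIdx series1 kv.1.1 == some i) && (pvFirstIdx series2 kv.1.2 == some j)))) := by
  set base := (PySem.Dict.ofList (dct.map (fun p => ((p.1, p.2.1), p.2.2)))).items with hbase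
  have hkeys : (base.map (fun kv => kv.1)).Nodup := by
    have h := PySem.Dict.nodup_keys_ofList (dct.map (fun p => ((p.1, p.2.1), p.2.2)))
    simpa [PySem.Dict.keys] using h
  have hnd : base.Nodup := List.Nodup.of_map _ hkeys
  have hstep : ∀ (r : PySem.Dict (Int × Int) Int), ∀ tup1 ∈ series1,
      series2.foldl (fun r tup2 => r.update (base.filter (fun kv =>
        decide (kv.1.1 ≥ tup1.1) && decide (kv.1.1 ≤ tup1.2) &&
        decide (kv.1.2 ≥ tup2.1) && decide (kv.1.2 ≤ tup2.2)))) r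
      = r.update (series2.flatMap (fun tup2 => base.filter (fun kv =>
          pvM tup1 kv.1.1 && pvM tup2 kv.1.2))) := by
    intro r tup1 _
    rw [pv_foldl_update]
    congr 1
    apply List.flatMap_congr
    intro tup2 _
    apply List.filter_congr
    intro kv _
    simp [pvM, ge_iff_le, Bool.and_assoc]
  rw [PySem.List.foldl_congr_mem series1 _ _ _ hstep, pv_foldl_update]
  have hBF : ∀ p ∈ (series1.flatMap fun tup1 => series2.flatMap fun tup2 =>
      base.filter (fun kv => pvM tup1 kv.1.1 && pvM tup2 kv.1.2)), p ∈ base := by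
    intro p hp
    obtain ⟨t1, _, hp⟩ := List.mem_flatMap.mp hp
    obtain ⟨t2, _, hp⟩ := List.mem_flatMap.mp hp
    exact (List.mem_filter.mp hp).1
  rw [pv_update_items _ PySem.Dict.empty PySem.Dict.nodup_keys_empty
    (by intro p _ q hq _; simp [PySem.Dict.empty] at hq)
    (fun p hp q hq he => List.inj_on_of_nodup_map hkeys (hBF p hp) (hBF q hq) he)]
  simp only [PySem.Dict.contains_empty, Bool.not_false, List.filter_true]
  rw [pv_dedup_flat2 base hnd (fun t kv => pvM t kv.1.1) (fun t kv => pvM t kv.1.2) series2 series1]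
  simp only [← pvFirstIdx_eq_findIdx]
  simp [PySem.Dict.empty]

-- B's bucket construction emits exactly the same regrouping
theorem pv_B_items (dct : List (Int × Int × Int)) (series1 series2 : List (Int × Int)) :
    ((List.range series1.length).foldl (fun o i =>
      (List.range series2.length).foldl (fun o j =>
        (((PySem.Dict.ofList (dct.map (fun p => ((p.1, p.2.1), p.2.2)))).items.foldl (fun b kv =>
            match pvFirstIdx series1 kv.1.1, pvFirstIdx series2 kv.1.2 with
            | some i, some j => b.modify (i, j) [] (· ++ [kv])
            | _, _ => b) PySem.Dict.empty).getD (i, j) []).foldl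
          (fun o kv => o.insert kv.1 kv.2) o) o) PySem.Dict.empty).items
    = (List.range series1.length).flatMap (fun i => (List.range series2.length).flatMap (fun j =>
        (PySem.Dict.ofList (dct.map (fun p => ((p.1, p.2.1), p.2.2)))).items.filter (fun kv =>
          (pvFirstIdx series1 kv.1.1 == some i) && (pvFirstIdx series2 kv.1.2 == some j)))) := by
  set base := (PySem.Dict.ofList (dct.map (fun p => ((p.1, p.2.1), p.2.2)))).items with hbase
  have hkeys : (base.map (fun kv => kv.1)).Nodup := by
    have h := PySem.Dict.nodup_keys_ofList (dct.map (fun p => ((p.1, p.2.1), p.2.2)))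
    simpa [PySem.Dict.keys] using h
  have hgetD : ∀ i j : Nat,
      (base.foldl (fun b kv =>
        match pvFirstIdx series1 kv.1.1, pvFirstIdx series2 kv.1.2 with
        | some i, some j => b.modify (i, j) [] (· ++ [kv])
        | _, _ => b) PySem.Dict.empty).getD (i, j) []
      = base.filter (fun kv =>
          (pvFirstIdx series1 kv.1.1 == some i) && (pvFirstIdx series2 kv.1.2 == some j)) := by
    intro i j
    rw [pv_buckets_getD series1 series2 i j base PySem.Dict.empty]
    simp [PySem.Dict.getD_empty]
  have houter : ∀ (o : PySem.Dict (Int × Int) Int), ∀ i ∈ List.range series1.length,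
      (List.range series2.length).foldl (fun o j =>
        ((base.foldl (fun b kv =>
            match pvFirstIdx series1 kv.1.1, pvFirstIdx series2 kv.1.2 with
            | some i, some j => b.modify (i, j) [] (· ++ [kv])
            | _, _ => b) PySem.Dict.empty).getD (i, j) []).foldl
          (fun o kv => o.insert kv.1 kv.2) o) o
      = ((List.range series2.length).flatMap (fun j => base.filter (fun kv =>
          (pvFirstIdx series1 kv.1.1 == some i) && (pvFirstIdx series2 kv.1.2 == some j)))).foldl
          (fun o kv => o.insert kv.1 kv.2) o := by
    intro o i _
    rw [PySem.List.foldl_congr_mem _ _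
      (fun o j => (base.filter (fun kv =>
        (pvFirstIdx series1 kv.1.1 == some i) && (pvFirstIdx series2 kv.1.2 == some j))).foldl
        (fun o kv => o.insert kv.1 kv.2) o) _
      (by intro o' j _; rw [hgetD])]
    rw [pv_foldl_flatMap]
  rw [PySem.List.foldl_congr_mem _ _ _ _ houter, pv_foldl_flatMap]
  have hflat_keys : (((List.range series1.length).flatMap (fun i =>
      (List.range series2.length).flatMap (fun j => base.filter (fun kv =>
        (pvFirstIdx series1 kv.1.1 == some i) && (pvFirstIdx series2 kv.1.2 == some j))))).map
        (fun kv => kv.1)).Nodup := by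
    have hids : ((List.range series1.length).flatMap (fun i =>
        (List.range series2.length).map (fun j =>
          ((some i : Option Nat), (some j : Option Nat))))).Nodup := by
      have heq : ((List.range series1.length).flatMap (fun i =>
          (List.range series2.length).map (fun j =>
            ((some i : Option Nat), (some j : Option Nat)))))
          = ((List.range series1.length) ×ˢ (List.range series2.length)).map
              (fun p => ((some p.1 : Option Nat), (some p.2 : Option Nat))) := by
        simp only [SProd.sprod, List.product, List.map_flatMap, List.map_map]
        rfl
      rw [heq]
      refine (List.Nodup.product List.nodup_range List.nodup_range).map ?_
      rintro ⟨a, b⟩ ⟨c, d⟩ h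
      simp at h
      simp [h.1, h.2]
    have heq2 : ((List.range series1.length).flatMap (fun i =>
        (List.range series2.length).flatMap (fun j => base.filter (fun kv =>
          (pvFirstIdx series1 kv.1.1 == some i) && (pvFirstIdx series2 kv.1.2 == some j)))))
        = ((List.range series1.length).flatMap (fun i =>
            (List.range series2.length).map (fun j =>
              ((some i : Option Nat), (some j : Option Nat))))).flatMap
            (fun c => base.filter (fun kv =>
              ((pvFirstIdx series1 kv.1.1, pvFirstIdx series2 kv.1.2) : Option Nat × Option Nat) == c)) := by
      rw [List.flatMap_assoc]
      apply List.flatMap_congr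
      intro i _
      rw [List.flatMap_map]
      rfl
    rw [heq2]
    exact pv_nodup_flatten base (fun kv => kv.1) hkeys
      (fun kv => (pvFirstIdx series1 kv.1.1, pvFirstIdx series2 kv.1.2)) _ hids
  have hfresh := PySem.Dict.items_foldl_insert_fresh
    ((List.range series1.length).flatMap (fun i => (List.range series2.length).flatMap (fun j =>
      base.filter (fun kv =>
        (pvFirstIdx series1 kv.1.1 == some i) && (pvFirstIdx series2 kv.1.2 == some j)))))
    (fun kv => kv.1) (fun kv => kv.2) PySem.Dict.empty
    (by intro a _; exact PySem.Dict.contains_empty _) hflat_keys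
  simpa [PySem.Dict.empty] using hfresh

-- ===== VERDICT (by name: the statement is the Claim_ definition above) =====
theorem between_2_segments_spec : Claim_equal_between_2_segments := by
  unfold Claim_equal_between_2_segments
  intro dct series1 series2 _
  unfold Spec_between_2_segments
  show between_2_segments dct series1 series2 = between_2_segments_alt dct series1 series2
  simp only [between_2_segments, between_2_segments_alt]
  rw [pv_A_items, pv_B_items]
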